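-- pv_equiv track=rewrite | github.com/uray-lu/codility | 15.2CountDistinctSlices.py | solution
-- ===== SOURCE A (Python) =====
-- def solution(M, A):
--
--     list_len = len(A)
--     result, front, back = 0 ,0, 0
--     visited = [False]*(M+1)
--
--
--     while back < list_len :
--
--         if front < list_len and visited[A[front]] == False:
--             #每增加一個數字多這麼多slice組合
--             result += front - back +1
--             visited[A[front]] = True
--             front +=1
--
--         else:
--             visited[A[back]] = False
--             back += 1
--
--         if result > 1000000000:
--             return 1000000000
--     return result
-- ===== SOURCE B (Python) =====
-- def solution(M, A):
--     result = 0
--     left = 0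
--     last = [0] * (M + 1)
--     for j in range(len(A)):
--         v = A[j]
--         if last[v] > left:
--             left = last[v]
--         last[v] = j + 1
--         result += j - left + 1
--         if result > 1000000000:
--             return 1000000000
--     return result
-- ===== Notes on version B (the rewrite author's own statement) =====
-- stated objective: simpler
-- what changed: Replaces A's while-loop two-pointer with a boolean visited array and step-by-step back-pointer eviction by a single for-loop over the right endpoint that jumps the left boundary directly using an array of last-seen positions (no eviction loop, no un-marking).
import Mathlib
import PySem

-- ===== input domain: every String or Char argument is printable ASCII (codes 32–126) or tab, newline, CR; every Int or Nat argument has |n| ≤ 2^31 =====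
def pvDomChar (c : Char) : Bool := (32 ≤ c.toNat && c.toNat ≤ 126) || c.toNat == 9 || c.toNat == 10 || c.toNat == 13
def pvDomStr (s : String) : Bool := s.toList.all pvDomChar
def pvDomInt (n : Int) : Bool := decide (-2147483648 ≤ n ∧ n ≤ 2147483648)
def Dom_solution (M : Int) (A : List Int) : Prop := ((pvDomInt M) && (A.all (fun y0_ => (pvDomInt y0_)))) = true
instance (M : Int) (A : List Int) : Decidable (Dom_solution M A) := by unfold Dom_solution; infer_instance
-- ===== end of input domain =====

-- B replaces A's two-pointer eviction loop over a boolean visited array by one forward pass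
-- jumping the left boundary via last-seen positions (objective: simpler). Return values only; no mutation.

-- ===== PORT A =====
-- while loop of A: state (visited, result, front, back); IndexError cases (visited[A[i]] out of
-- range) are excluded by Pre_solution, where the pyGetD/pySetD defaults are never reached.
def loopA (A : List Int) (visited : List Bool) (result : Int) (front back : Nat) : Int :=
  if h : back < A.length then
    if hc : front < A.length ∧ PySem.List.pyGetD visited (A.getD front 0) false = false then
      let result' := result + (front : Int) - (back : Int) + 1
      let visited' := PySem.List.pySetD visited (A.getD front 0) true
      if result' > 1000000000 then 1000000000
      else loopA A visited' result' (front + 1) back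
    else
      let visited' := PySem.List.pySetD visited (A.getD back 0) false
      if result > 1000000000 then 1000000000
      else loopA A visited' result front (back + 1)
  else result
termination_by (A.length - front) + (A.length - back)
decreasing_by
  · omega
  · omega

def solution (M : Int) (A : List Int) : Int :=
  loopA A (List.replicate (M + 1).toNat false) 0 0 0

-- ===== PORT B =====
-- for j in range(len(A)) of B: state (last, result, left)
def loopB (A : List Int) (last : List Int) (result left : Int) (j : Nat) : Int :=
  if h : j < A.length then
    let v := A.getD j 0
    let lv := PySem.List.pyGetD last v 0
    let left' := if lv > left then lv else left
    let last' := PySem.List.pySetD last v ((j : Int) + 1)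
    let result' := result + (j : Int) - left' + 1
    if result' > 1000000000 then 1000000000
    else loopB A last' result' left' (j + 1)
  else result
termination_by A.length - j

def solution_alt (M : Int) (A : List Int) : Int :=
  loopB A (List.replicate (M + 1).toNat 0) 0 0 0

-- ===== PRECONDITION & SPEC =====
-- Pre_ excludes exactly the inputs on which A raises IndexError (some element outside
-- [-(M+1), M], indexing the visited array of size M+1, with a non-empty A).
def Pre_solution (M : Int) (A : List Int) : Prop :=
  A = [] ∨ (0 ≤ M ∧ ∀ a ∈ A, -(M + 1) ≤ a ∧ a ≤ M)
instance (M : Int) (A : List Int) : Decidable (Pre_solution M A) := by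
  unfold Pre_solution; infer_instance

def pvWitness_solution : Int × List Int := (2, [0, 1, 2, 1, -1])

def Spec_solution (M : Int) (A : List Int) (out : Int) : Prop := out = solution_alt M A
instance (M : Int) (A : List Int) (out : Int) : Decidable (Spec_solution M A out) := by
  unfold Spec_solution; infer_instance

-- ===== CLAIM (what is proved, stated in full; the proofs are below) =====
def Claim_equal_solution : Prop := ∀ (M : Int) (A : List Int), Dom_solution M A → Pre_solution M A → Spec_solution M A (solution M A)

-- ===== LEMMAS AND PROOFS =====

-- Python's index normalisation on an in-range index.
def pyKey (n : Nat) (v : Int) : Nat := if 0 ≤ v then v.toNat else n - (-v).toNat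

-- the visited/last slot addressed when reading position i of A
def kOf (M : Int) (A : List Int) (i : Nat) : Nat := pyKey (M + 1).toNat (A.getD i 0)

-- 1 + last position < j whose slot is k (0 if none), exactly what B's last array stores
def lastP (M : Int) (A : List Int) : Nat → Nat → Int
  | 0, _ => 0
  | j + 1, k => if kOf M A j = k then (j : Int) + 1 else lastP M A j k

-- invariant: V marks exactly the slots of A[b:j]
def WinV (M : Int) (A : List Int) (V : List Bool) (b j : Nat) : Prop :=
  V.length = (M + 1).toNat ∧
  ∀ k, k < (M + 1).toNat → (V.getD k false = true ↔ ∃ i, b ≤ i ∧ i < j ∧ kOf M A i = k)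

-- invariant: the slots of A[b:j] are pairwise distinct
def DistK (M : Int) (A : List Int) (b j : Nat) : Prop :=
  ∀ i i', b ≤ i → i < i' → i' < j → kOf M A i ≠ kOf M A i'

-- invariant: B's last array stores lastP
def LastInv (M : Int) (A : List Int) (Lst : List Int) (j : Nat) : Prop :=
  Lst.length = (M + 1).toNat ∧ ∀ k, k < (M + 1).toNat → Lst.getD k 0 = lastP M A j k

lemma pyIdx_eq (n : Nat) (v : Int) (h1 : -(n : Int) ≤ v) (h2 : v < (n : Int)) :
    PySem.List.pyIdx? n v = some (pyKey n v) := by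
  simp only [PySem.List.pyIdx?, pyKey]
  split_ifs <;> first | rfl | omega

lemma pyKey_lt (n : Nat) (v : Int) (h1 : -(n : Int) ≤ v) (h2 : v < (n : Int)) :
    pyKey n v < n := by
  unfold pyKey; split_ifs <;> omega

lemma conv_get {β : Type} (l : List β) (v : Int) (d : β)
    (h1 : -(l.length : Int) ≤ v) (h2 : v < (l.length : Int)) :
    PySem.List.pyGetD l v d = l.getD (pyKey l.length v) d := by
  simp only [PySem.List.pyGetD, PySem.List.pyGet?, pyIdx_eq _ _ h1 h2, Option.bind_some,
    List.getD_eq_getElem?_getD]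

lemma conv_set {β : Type} (l : List β) (v : Int) (x : β)
    (h1 : -(l.length : Int) ≤ v) (h2 : v < (l.length : Int)) :
    PySem.List.pySetD l v x = l.set (pyKey l.length v) x := by
  simp only [PySem.List.pySetD, PySem.List.pySet?, pyIdx_eq _ _ h1 h2, Option.map_some,
    Option.getD_some]

lemma getD_set {β : Type} (l : List β) (i k : Nat) (x d : β) (hi : i < l.length) :
    (l.set i x).getD k d = if k = i then x else l.getD k d := by
  simp only [List.getD_eq_getElem?_getD, List.getElem?_set]
  by_cases h : k = i
  · subst h; simp [hi]
  · rw [if_neg h, if_neg (fun hh : i = k => h hh.symm)]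

lemma elem_bound {M : Int} {A : List Int} (hb : ∀ a ∈ A, -(M + 1) ≤ a ∧ a ≤ M)
    {i : Nat} (hi : i < A.length) : -(M + 1) ≤ A.getD i 0 ∧ A.getD i 0 ≤ M := by
  have : A.getD i 0 ∈ A := by
    rw [List.getD_eq_getElem _ _ hi]; exact List.getElem_mem hi
  exact hb _ this

lemma lastP_le (M : Int) (A : List Int) (j k : Nat) : lastP M A j k ≤ (j : Int) := by
  induction j with
  | zero => simp [lastP]
  | succ j ih => unfold lastP; split_ifs <;> [omega; (push_cast; omega)]

lemma lastP_ge (M : Int) (A : List Int) {i j k : Nat} (hij : i < j) (hk : kOf M A i = k) :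
    (i : Int) + 1 ≤ lastP M A j k := by
  induction j with
  | zero => omega
  | succ j ih =>
    unfold lastP
    by_cases h : i = j
    · subst h; simp [hk]
    · have := ih (by omega)
      split_ifs <;> [(push_cast; omega); omega]

lemma lastP_le_of (M : Int) (A : List Int) {b j k : Nat}
    (h : ∀ i, b ≤ i → i < j → kOf M A i ≠ k) : lastP M A j k ≤ (b : Int) := by
  induction j with
  | zero => simp [lastP]
  | succ j ih =>
    unfold lastP
    by_cases hbj : b ≤ j
    · have hne : kOf M A j ≠ k := h j hbj (by omega)
      simp only [hne, if_false]
      exact ih fun i hbi hij => h i hbi (by omega)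
    · have := lastP_le M A j k
      split_ifs <;> omega

lemma kOf_lt {M : Int} {A : List Int} (hM : 0 ≤ M) (hb : ∀ a ∈ A, -(M + 1) ≤ a ∧ a ≤ M)
    {i : Nat} (hi : i < A.length) : kOf M A i < (M + 1).toNat := by
  have hv := elem_bound hb hi
  have hcast : ((M + 1).toNat : Int) = M + 1 := Int.toNat_of_nonneg (by omega)
  exact pyKey_lt _ _ (by omega) (by omega)

-- conversions specialised to reads/writes of the visited/last arrays at position i of A
lemma conv_get' {β : Type} {M : Int} {A : List Int} (hM : 0 ≤ M)
    (hb : ∀ a ∈ A, -(M + 1) ≤ a ∧ a ≤ M) {i : Nat} (hi : i < A.length)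
    (l : List β) (hl : l.length = (M + 1).toNat) (d : β) :
    PySem.List.pyGetD l (A.getD i 0) d = l.getD (kOf M A i) d := by
  have hv := elem_bound hb hi
  have hcast : ((M + 1).toNat : Int) = M + 1 := Int.toNat_of_nonneg (by omega)
  rw [conv_get l _ d (by rw [hl]; omega) (by rw [hl]; omega), kOf, hl]

lemma conv_set' {β : Type} {M : Int} {A : List Int} (hM : 0 ≤ M)
    (hb : ∀ a ∈ A, -(M + 1) ≤ a ∧ a ≤ M) {i : Nat} (hi : i < A.length)
    (l : List β) (hl : l.length = (M + 1).toNat) (x : β) :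
    PySem.List.pySetD l (A.getD i 0) x = l.set (kOf M A i) x := by
  have hv := elem_bound hb hi
  have hcast : ((M + 1).toNat : Int) = M + 1 := Int.toNat_of_nonneg (by omega)
  rw [conv_set l _ x (by rw [hl]; omega) (by rw [hl]; omega), kOf, hl]

-- after front reaches the end, A's loop only drains back and returns result unchanged
lemma drain (A : List Int) (r : Int) (hr : r ≤ 1000000000) :
    ∀ (c b : Nat) (V : List Bool), A.length - b ≤ c → loopA A V r A.length b = r := by
  intro c
  induction c with
  | zero =>
    intro b V hc
    rw [loopA]
    simp only [dif_neg (by omega : ¬ b < A.length)]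
  | succ c ih =>
    intro b V hc
    rw [loopA]
    by_cases hbl : b < A.length
    · have hcnd : ¬ (A.length < A.length ∧
          PySem.List.pyGetD V (A.getD A.length 0) false = false) :=
        fun hcontra => absurd hcontra.1 (lt_irrefl _)
      simp only [dif_pos hbl, dif_neg hcnd, if_neg (by omega : ¬ r > 1000000000)]
      exact ih (b + 1) _ (by omega)
    · simp only [dif_neg hbl]

-- the eviction run: A's loop at front = j advances back to max back (lastP j (kOf j))
lemma runEvict {M : Int} {A : List Int} (hM : 0 ≤ M)
    (hb : ∀ a ∈ A, -(M + 1) ≤ a ∧ a ≤ M) (r : Int) (hr : r ≤ 1000000000)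
    {j : Nat} (hj : j < A.length) :
    ∀ (c b : Nat) (V : List Bool), j - b ≤ c → b ≤ j → WinV M A V b j → DistK M A b j →
    ∃ b' V', loopA A V r j b = loopA A V' r j b' ∧ b ≤ b' ∧ b' ≤ j ∧
      WinV M A V' b' j ∧ DistK M A b' j ∧ V'.getD (kOf M A j) false = false ∧
      (b' : Int) = max (b : Int) (lastP M A j (kOf M A j)) := by
  intro c
  induction c with
  | zero =>
    intro b V hc hbj hW hD
    have hbe : b = j := by omega
    refine ⟨b, V, rfl, le_refl _, hbj, hW, hD, ?_, ?_⟩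
    · cases hval : V.getD (kOf M A j) false
      · rfl
      · obtain ⟨i, h1, h2, _⟩ := (hW.2 _ (kOf_lt hM hb hj)).1 hval
        omega
    · have h1 : lastP M A j (kOf M A j) ≤ (b : Int) :=
        lastP_le_of M A (fun i hi hij => absurd hij (by omega))
      rw [max_eq_left h1]
  | succ c ih =>
    intro b V hc hbj hW hD
    by_cases hI : V.getD (kOf M A j) false = false
    · refine ⟨b, V, rfl, le_refl _, hbj, hW, hD, hI, ?_⟩
      have hno : ∀ i, b ≤ i → i < j → kOf M A i ≠ kOf M A j := by
        intro i h1 h2 hk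
        have hmem : V.getD (kOf M A j) false = true :=
          (hW.2 _ (kOf_lt hM hb hj)).2 ⟨i, h1, h2, hk⟩
        rw [hI] at hmem
        exact absurd hmem (by decide)
      have h1 := lastP_le_of M A hno
      rw [max_eq_left h1]
    · have hI' : V.getD (kOf M A j) false = true := by
        cases hval : V.getD (kOf M A j) false
        · exact absurd hval hI
        · rfl
      obtain ⟨i, hbi, hij, hki⟩ := (hW.2 _ (kOf_lt hM hb hj)).1 hI'
      have hbj' : b < j := by omega
      have hblt : b < A.length := by omega
      -- one eviction step
      rw [loopA]
      have hgetj : PySem.List.pyGetD V (A.getD j 0) false = V.getD (kOf M A j) false :=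
        conv_get' hM hb hj V hW.1 false
      have hcnd : ¬ (j < A.length ∧ PySem.List.pyGetD V (A.getD j 0) false = false) := by
        rintro ⟨-, hfa⟩
        rw [hgetj, hI'] at hfa
        exact absurd hfa (by decide)
      simp only [dif_pos hblt, dif_neg hcnd, if_neg (by omega : ¬ r > 1000000000)]
      rw [conv_set' hM hb hblt V hW.1 false]
      set V₁ := V.set (kOf M A b) false with hV₁
      have hlen₁ : V₁.length = (M + 1).toNat := by rw [hV₁, List.length_set, hW.1]
      have hW₁ : WinV M A V₁ (b + 1) j := by
        refine ⟨hlen₁, fun k hk => ?_⟩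
        rw [hV₁, getD_set V _ k false false (by rw [hW.1]; exact kOf_lt hM hb hblt)]
        by_cases hkb : k = kOf M A b
        · rw [if_pos hkb]
          constructor
          · intro h; exact absurd h (by decide)
          · rintro ⟨i', h1, h2, h3⟩
            rw [hkb] at h3
            exact absurd h3.symm (hD b i' (le_refl _) (by omega) h2)
        · rw [if_neg hkb, hW.2 k hk]
          constructor
          · rintro ⟨i', h1, h2, h3⟩
            have hne : i' ≠ b := fun he => hkb (by rw [← h3, he])
            exact ⟨i', by omega, h2, h3⟩
          · rintro ⟨i', h1, h2, h3⟩; exact ⟨i', by omega, h2, h3⟩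
      have hD₁ : DistK M A (b + 1) j := fun i₁ i₂ h1 h2 h3 => hD i₁ i₂ (by omega) h2 h3
      obtain ⟨b', V', heq, hb1, hb2, hW', hD', hf', hmax⟩ :=
        ih (b + 1) V₁ (by omega) (by omega) hW₁ hD₁
      refine ⟨b', V', heq, by omega, hb2, hW', hD', hf', ?_⟩
      have hge : (i : Int) + 1 ≤ lastP M A j (kOf M A j) := lastP_ge M A hij hki
      rw [hmax, max_eq_right (by push_cast; omega), max_eq_right (by push_cast; omega)]

-- main synchronised induction: A's loop from a round boundary equals B's loop
lemma mainLemma {M : Int} {A : List Int} (hM : 0 ≤ M)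
    (hb : ∀ a ∈ A, -(M + 1) ≤ a ∧ a ≤ M) :
    ∀ (c j b : Nat) (V : List Bool) (Lst : List Int) (r : Int),
      A.length - j ≤ c → j ≤ A.length → b ≤ j → r ≤ 1000000000 →
      WinV M A V b j → DistK M A b j → LastInv M A Lst j →
      loopA A V r j b = loopB A Lst r (b : Int) j := by
  intro c
  induction c with
  | zero =>
    intro j b V Lst r hc hjn hbj hr hW hD hL
    have hje : j = A.length := by omega
    subst hje
    rw [loopB]
    simp only [dif_neg (lt_irrefl _)]
    exact drain A r hr A.length b V (by omega)
  | succ c ih =>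
    intro j b V Lst r hc hjn hbj hr hW hD hL
    by_cases hj : j < A.length
    · obtain ⟨b', V', heq, hbb', hb'j, hW', hD', hfalse, hmax⟩ :=
        runEvict hM hb r hr hj (j - b) b V (le_refl _) hbj hW hD
      rw [heq, loopA, loopB]
      have hgetj : PySem.List.pyGetD V' (A.getD j 0) false = V'.getD (kOf M A j) false :=
        conv_get' hM hb hj V' hW'.1 false
      simp only [dif_pos hj, dif_pos (by omega : b' < A.length),
        dif_pos (⟨hj, by rw [hgetj, hfalse]⟩ :
          j < A.length ∧ PySem.List.pyGetD V' (A.getD j 0) false = false)]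
      have hlv : PySem.List.pyGetD Lst (A.getD j 0) 0 = lastP M A j (kOf M A j) := by
        rw [conv_get' hM hb hj Lst hL.1 0]
        exact hL.2 _ (kOf_lt hM hb hj)
      rw [hlv]
      have hleft : (if lastP M A j (kOf M A j) > (b : Int) then lastP M A j (kOf M A j)
          else (b : Int)) = (b' : Int) := by
        rw [hmax]
        rcases le_or_gt (lastP M A j (kOf M A j)) (b : Int) with h | h
        · rw [if_neg (by omega), max_eq_left h]
        · rw [if_pos h, max_eq_right (le_of_lt h)]
      rw [hleft]
      by_cases hcap : r + (j : Int) - (b' : Int) + 1 > 1000000000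
      · rw [if_pos hcap, if_pos hcap]
      · rw [if_neg hcap, if_neg hcap]
        rw [conv_set' hM hb hj V' hW'.1 true, conv_set' hM hb hj Lst hL.1 ((j : Int) + 1)]
        have hkj := kOf_lt hM hb hj
        have hW'' : WinV M A (V'.set (kOf M A j) true) b' (j + 1) := by
          refine ⟨by rw [List.length_set, hW'.1], fun k hk => ?_⟩
          rw [getD_set V' _ k true false (by rw [hW'.1]; exact hkj)]
          by_cases hkb : k = kOf M A j
          · rw [if_pos hkb]
            constructor
            · intro _; exact ⟨j, by omega, by omega, hkb.symm⟩
            · intro _; rfl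
          · rw [if_neg hkb, hW'.2 k hk]
            constructor
            · rintro ⟨i', h1, h2, h3⟩; exact ⟨i', h1, by omega, h3⟩
            · rintro ⟨i', h1, h2, h3⟩
              rcases Nat.lt_succ_iff_lt_or_eq.1 h2 with h | h
              · exact ⟨i', h1, h, h3⟩
              · subst h; exact absurd h3.symm hkb
        have hD'' : DistK M A b' (j + 1) := by
          intro i₁ i₂ h1 h2 h3
          rcases Nat.lt_succ_iff_lt_or_eq.1 h3 with h | h
          · exact hD' i₁ i₂ h1 h2 h
          · intro hcontra
            rw [h] at h2 hcontra
            have hmem : V'.getD (kOf M A j) false = true :=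
              (hW'.2 _ hkj).2 ⟨i₁, h1, h2, hcontra⟩
            rw [hfalse] at hmem
            exact absurd hmem (by decide)
        have hL'' : LastInv M A (Lst.set (kOf M A j) ((j : Int) + 1)) (j + 1) := by
          refine ⟨by rw [List.length_set, hL.1], fun k hk => ?_⟩
          rw [getD_set Lst _ k _ 0 (by rw [hL.1]; exact hkj)]
          show _ = lastP M A (j + 1) k
          unfold lastP
          by_cases hkb : k = kOf M A j
          · simp [hkb]
          · rw [if_neg hkb, if_neg (fun h => hkb h.symm)]
            exact hL.2 k hk
        exact ih (j + 1) b' _ _ _ (by omega) (by omega) (by omega) (by omega) hW'' hD'' hL''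
    · have hje : j = A.length := by omega
      subst hje
      rw [loopB]
      simp only [dif_neg (lt_irrefl _)]
      exact drain A r hr A.length b V (by omega)

-- ===== VERDICT (by name: the statement is the Claim_ definition above) =====
theorem solution_spec : Claim_equal_solution := by
  intro M A _ hpre
  unfold Spec_solution solution solution_alt
  rcases hpre with hA | ⟨hM, hbound⟩
  · subst hA
    rw [loopA, loopB]
    simp
  · have hW0 : WinV M A (List.replicate (M + 1).toNat false) 0 0 := by
      refine ⟨List.length_replicate, fun k hk => ?_⟩
      constructor
      · intro h
        rw [List.getD_eq_getElem?_getD, List.getElem?_replicate] at h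
        split_ifs at h <;> simp_all
      · rintro ⟨i, _, h2, _⟩; omega
    have hL0 : LastInv M A (List.replicate (M + 1).toNat 0) 0 := by
      refine ⟨List.length_replicate, fun k hk => ?_⟩
      rw [List.getD_eq_getElem?_getD, List.getElem?_replicate]
      split_ifs <;> simp [lastP]
    have hD0 : DistK M A 0 0 := by intro i i' _ _ h; omega
    have := mainLemma hM hbound A.length 0 0 _ _ 0 (by omega) (by omega) (by omega)
      (by omega) hW0 hD0 hL0
    simpa using this
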